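-- pv_equiv track=rewrite | github.com/SillySam/Plate-Completer | plate_scanner.py | generate_number_combos
-- ===== SOURCE A (Python) =====
-- def generate_number_combos(plate_end):
--     solutions = []
--
--     # Get indexes of unknown numbers
--     q_indexes = [i for i, ltr in enumerate(plate_end) if ltr == '?']
--     number_of_q = len(q_indexes)
--
--     # Generate list of number combos
--     nums = [((("0" * (number_of_q - len(str(i)))) + str(i))) for i in range(0, 10 ** number_of_q)]
--
--     # Use generated nums by replacing the unknown '?'s
--     for i in nums:
--         current = list(plate_end)
--
--         # Replace '?' with number possibilities
--         for j in range(len(q_indexes)):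
--             current[q_indexes[j]] = i[j]
--
--         solutions.append(''.join(current))
--
--     return solutions
-- ===== SOURCE B (Python) =====
-- def generate_number_combos(plate_end):
--     # Expand the placeholder positions one at a time, tenfold each step (no numeric
--     # counter, no zero-padding): leftmost '?' varies slowest, digits 0-9.
--     q_indexes = [i for i, ltr in enumerate(plate_end) if ltr == '?']
--     results = [plate_end]
--     for idx in q_indexes:
--         results = [s[:idx] + d + s[idx + 1:] for s in results for d in "0123456789"]
--     return results
-- ===== Notes on version B (the rewrite author's own statement) =====
-- stated objective: alternative
-- what changed: Replaces the numeric counter with zero-padded str(i) by an incremental product: iterate over the placeholder positions and expand each current string with digits 0-9, so no int-to-string conversion or padding is needed.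
import Mathlib
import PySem

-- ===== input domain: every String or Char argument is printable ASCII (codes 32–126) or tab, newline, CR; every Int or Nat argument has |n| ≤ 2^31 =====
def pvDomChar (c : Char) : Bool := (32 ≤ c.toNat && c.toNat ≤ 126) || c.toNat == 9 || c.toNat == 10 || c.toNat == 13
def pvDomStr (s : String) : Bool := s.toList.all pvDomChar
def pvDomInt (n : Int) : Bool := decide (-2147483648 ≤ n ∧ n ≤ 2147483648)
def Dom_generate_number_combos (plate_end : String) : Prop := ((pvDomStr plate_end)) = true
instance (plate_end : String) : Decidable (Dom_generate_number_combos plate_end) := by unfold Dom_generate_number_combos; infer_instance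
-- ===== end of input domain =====

-- B replaces A's zero-padded numeric counter by expanding each placeholder position with the digits 0-9 in turn (alternative decomposition, same output order).
-- Strings are carried as their character lists inside both ports (''.join / one-char concatenation are exact on them).

-- ===== PORT A =====
def generate_number_combos (plate_end : String) : List String :=
  let solutions : List String := []
  -- q_indexes = [i for i, ltr in enumerate(plate_end) if ltr == '?']
  let q_indexes : List Int :=
    ((PySem.List.enumerate plate_end.toList 0).filter (fun p => p.2 == '?')).map (fun p => p.1)
  let number_of_q : Int := PySem.List.len q_indexes
  -- nums = [("0" * (number_of_q - len(str(i)))) + str(i) for i in range(0, 10 ** number_of_q)]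
  -- (number_of_q ≥ 0, so 10 ** number_of_q is ported as 10 ^ number_of_q.toNat)
  let nums : List (List Char) :=
    (PySem.List.pyRange 0 ((10 : Int) ^ number_of_q.toNat) 1).map (fun i =>
      PySem.List.pyRepeat ['0'] (number_of_q - ((PySem.Int.toChars i).length : Int)) ++
        PySem.Int.toChars i)
  -- for i in nums: current = list(plate_end); for j in range(len(q_indexes)): current[q_indexes[j]] = i[j]; solutions.append(''.join(current))
  -- (every index below is provably in range, so the total forms pySetD/pyGetD are exact)
  nums.foldl (fun sols i =>
    let current := plate_end.toList
    let current :=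
      (PySem.List.pyRange 0 (PySem.List.len q_indexes) 1).foldl (fun cur j =>
        PySem.List.pySetD cur (PySem.List.pyGetD q_indexes j 0) (PySem.List.pyGetD i j ' ')) current
    sols ++ [String.ofList current]) solutions

-- ===== PORT B =====
def generate_number_combos_alt (plate_end : String) : List String :=
  -- q_indexes = [i for i, ltr in enumerate(plate_end) if ltr == '?']
  let q_indexes : List Int :=
    ((PySem.List.enumerate plate_end.toList 0).filter (fun p => p.2 == '?')).map (fun p => p.1)
  -- results = [plate_end]; for idx in q_indexes: results = [s[:idx] + d + s[idx+1:] for s in results for d in "0123456789"]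
  let results : List (List Char) :=
    q_indexes.foldl (fun results idx =>
      results.flatMap (fun s =>
        ['0','1','2','3','4','5','6','7','8','9'].map (fun d =>
          PySem.List.slice s none (some idx) ++ [d] ++ PySem.List.slice s (some (idx + 1)) none)))
      [plate_end.toList]
  results.map String.ofList

-- ===== PRECONDITION & SPEC =====
def Spec_generate_number_combos (plate_end : String) (out : List String) : Prop := out = generate_number_combos_alt plate_end
instance (plate_end : String) (out : List String) : Decidable (Spec_generate_number_combos plate_end out) := by unfold Spec_generate_number_combos; infer_instance

-- ===== CLAIM (what is proved, stated in full; the proofs are below) =====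
def Claim_equal_generate_number_combos : Prop := ∀ (plate_end : String), Dom_generate_number_combos plate_end → Spec_generate_number_combos plate_end (generate_number_combos plate_end)

-- ===== LEMMAS AND PROOFS =====

def pvDigits : List Char := ['0','1','2','3','4','5','6','7','8','9']

-- big-endian decimal digits of n, without fuel (the meaning of Nat.toDigits 10)
def myDigits (n : Nat) : List Char :=
  if n < 10 then [Nat.digitChar n]
  else myDigits (n / 10) ++ [Nat.digitChar (n % 10)]
decreasing_by exact Nat.div_lt_self (by omega) (by omega)

theorem myDigits_lt (n : Nat) (h : n < 10) : myDigits n = [Nat.digitChar n] := by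
  rw [myDigits]; simp [h]

theorem myDigits_ge (n : Nat) (h : 10 ≤ n) :
    myDigits n = myDigits (n / 10) ++ [Nat.digitChar (n % 10)] := by
  rw [myDigits]; simp [Nat.not_lt.2 h]

theorem toDigitsCore_eq (f : Nat) : ∀ (n : Nat) (l : List Char), n < f →
    Nat.toDigitsCore 10 f n l = myDigits n ++ l := by
  induction f with
  | zero => intro n l h; omega
  | succ f ih =>
    intro n l h
    by_cases h10 : n < 10
    · have hd : n / 10 = 0 := Nat.div_eq_of_lt h10
      simp [Nat.toDigitsCore, hd, myDigits_lt n h10, Nat.mod_eq_of_lt h10]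
    · have hd : ¬ n / 10 = 0 := by omega
      have hlt : n / 10 < f := lt_of_lt_of_le (Nat.div_lt_self (by omega) (by omega)) (by omega)
      simp only [Nat.toDigitsCore, hd, if_false]
      rw [ih (n / 10) _ hlt, myDigits_ge n (by omega)]
      simp

theorem toChars_natCast (n : Nat) : PySem.Int.toChars (n : Int) = myDigits n := by
  unfold PySem.Int.toChars
  rw [if_neg (by omega)]
  show Nat.toDigits 10 (Int.toNat n) = myDigits n
  rw [Int.toNat_natCast, Nat.toDigits, toDigitsCore_eq (n + 1) n [] (by omega), List.append_nil]

-- str(m) zero-padded on the left to width q (Python's "0"*(q-len)+str: negative repeat is empty)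
def padC (q r : Nat) : List Char := List.replicate (q - (myDigits r).length) '0' ++ myDigits r

theorem padC_len (q r : Nat) : q ≤ (padC q r).length := by
  simp [padC]; omega

theorem digitChar_zero : Nat.digitChar 0 = '0' := by decide

theorem padC_succ (q m k : Nat) (hq : 1 ≤ q) (hk : k < 10) :
    padC (q + 1) (10 * m + k) = padC q m ++ [Nat.digitChar k] := by
  rcases Nat.eq_zero_or_pos m with hm | hm
  · subst hm
    simp only [Nat.mul_zero, Nat.zero_add]
    rw [padC, padC, myDigits_lt k hk, myDigits_lt 0 (by omega), digitChar_zero]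
    have h1 : List.replicate (q - 1) '0' ++ ['0'] = List.replicate q '0' := by
      rw [← List.replicate_succ']
      congr 1; omega
    simp only [List.length_singleton, Nat.add_sub_cancel]
    rw [h1]
  · have h10 : 10 ≤ 10 * m + k := by omega
    have hdiv : (10 * m + k) / 10 = m := by
      rw [Nat.mul_add_div (by omega), Nat.div_eq_of_lt hk]; omega
    have hmod : (10 * m + k) % 10 = k := by
      rw [Nat.mul_add_mod, Nat.mod_eq_of_lt hk]
    rw [padC, padC, myDigits_ge _ h10, hdiv, hmod]
    rw [List.length_append, List.length_singleton]
    have : q + 1 - ((myDigits m).length + 1) = q - (myDigits m).length := by omega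
    rw [this, ← List.append_assoc]

theorem digits_map : (List.range 10).map Nat.digitChar = pvDigits := by decide

-- all digit strings of length q, last position varying fastest
def allDS : Nat → List (List Char)
  | 0 => [[]]
  | q + 1 => (allDS q).flatMap (fun s => pvDigits.map (fun d => s ++ [d]))

theorem mem_allDS_length (q : Nat) : ∀ u ∈ allDS q, u.length = q := by
  induction q with
  | zero => intro u hu; simp [allDS] at hu; simp [hu]
  | succ q ih =>
    intro u hu
    simp only [allDS, List.mem_flatMap, List.mem_map] at hu
    obtain ⟨s, hs, d, _, rfl⟩ := hu
    simp [ih s hs]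

theorem flatMap_congr_mem {α β : Type} (l : List α) (f g : α → List β)
    (h : ∀ x ∈ l, f x = g x) : l.flatMap f = l.flatMap g := by
  induction l with
  | nil => rfl
  | cons x xs ih =>
    simp only [List.flatMap_cons, h x (by simp),
      ih (fun y hy => h y (by simp [hy]))]

theorem range_mul10 {α : Type} (N : Nat) (f : Nat → α) :
    (List.range (N * 10)).map f
      = (List.range N).flatMap (fun m => (List.range 10).map (fun k => f (10 * m + k))) := by
  induction N with
  | zero => simp
  | succ N ih =>
    have h : (N + 1) * 10 = N * 10 + 10 := by ring
    rw [h, List.range_add, List.map_append, ih,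
      show List.range (N + 1) = List.range N ++ [N] from List.range_succ, List.flatMap_append]
    simp only [List.flatMap_cons, List.flatMap_nil, List.append_nil, List.map_map]
    congr 1
    apply List.map_congr_left
    intro k _
    simp [Nat.mul_comm]

theorem nums_eq (q : Nat) (hq : 1 ≤ q) :
    (List.range (10 ^ q)).map (fun m => padC q m) = allDS q := by
  induction q with
  | zero => omega
  | succ q ih =>
    rcases Nat.eq_zero_or_pos q with h0 | h0
    · subst h0
      rw [show (10 : Nat) ^ 1 = 10 by norm_num]
      have h1 : (List.range 10).map (fun m => padC 1 m)
          = (List.range 10).map (fun k => [Nat.digitChar k]) := by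
        apply List.map_congr_left
        intro k hk
        rw [List.mem_range] at hk
        rw [padC, myDigits_lt k hk]
        simp
      rw [h1, show (fun k => [Nat.digitChar k]) = (fun c => [c]) ∘ Nat.digitChar from rfl,
        ← List.map_map, digits_map]
      simp [allDS]
    · rw [pow_succ, range_mul10]
      have h2 : ∀ m ∈ List.range (10 ^ q),
          (List.range 10).map (fun k => padC (q + 1) (10 * m + k))
            = pvDigits.map (fun d => padC q m ++ [d]) := by
        intro m _
        have h3 : (List.range 10).map (fun k => padC (q + 1) (10 * m + k))
            = (List.range 10).map (fun k => padC q m ++ [Nat.digitChar k]) := by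
          apply List.map_congr_left
          intro k hk
          exact padC_succ q m k h0 (List.mem_range.1 hk)
        rw [h3, show (fun k => padC q m ++ [Nat.digitChar k])
            = (fun c => padC q m ++ [c]) ∘ Nat.digitChar from rfl, ← List.map_map, digits_map]
      rw [flatMap_congr_mem _ _ _ h2,
        ← List.flatMap_map (fun m => padC q m) (fun s => pvDigits.map (fun d => s ++ [d]))
          (List.range (10 ^ q)), ih h0]
      simp [allDS]

theorem foldl_append_singleton {α β : Type} (f : α → β) (l : List α) :
    ∀ acc : List β, l.foldl (fun acc x => acc ++ [f x]) acc = acc ++ l.map f := by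
  induction l with
  | nil => simp
  | cons x xs ih => intro acc; simp [ih]

theorem innerfold_eq (cs : List Char) (qsN : List Nat) (num : List Char)
    (hlen : qsN.length ≤ num.length) :
    ((PySem.List.pyRange 0 (PySem.List.len (qsN.map (fun i : Nat => (i : Int)))) 1).foldl
      (fun cur j => PySem.List.pySetD cur
        (PySem.List.pyGetD (qsN.map (fun i : Nat => (i : Int))) j 0)
        (PySem.List.pyGetD num j ' ')) cs)
    = (qsN.zip num).foldl (fun c p => c.set p.1 p.2) cs := by
  have hlq : (qsN.map (fun i : Nat => (i : Int))).length = qsN.length := by simp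
  have hz : ((qsN.map (fun i : Nat => (i : Int))).zip num).length = qsN.length := by
    rw [List.length_zip, hlq]; omega
  have h1 : PySem.List.len (qsN.map (fun i : Nat => (i : Int)))
      = ((((qsN.map (fun i : Nat => (i : Int))).zip num).length : Nat) : Int) := by
    rw [PySem.List.len_eq, hlq, hz]
  rw [h1]
  have h2 : (PySem.List.pyRange 0 ((((qsN.map (fun i : Nat => (i : Int))).zip num).length : Nat) : Int) 1).foldl
      (fun cur j => PySem.List.pySetD cur
        (PySem.List.pyGetD (qsN.map (fun i : Nat => (i : Int))) j 0)
        (PySem.List.pyGetD num j ' ')) cs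
      = (PySem.List.pyRange 0 ((((qsN.map (fun i : Nat => (i : Int))).zip num).length : Nat) : Int) 1).foldl
      (fun cur j => (fun c (p : Int × Char) => PySem.List.pySetD c p.1 p.2) cur
        (PySem.List.pyGetD ((qsN.map (fun i : Nat => (i : Int))).zip num) j (0, ' '))) cs := by
    apply PySem.List.foldl_congr_mem
    intro acc j hj
    rw [PySem.List.mem_pyRange_one] at hj
    obtain ⟨hj0, hjl⟩ := hj
    have hjn : j.toNat < ((qsN.map (fun i : Nat => (i : Int))).zip num).length := by omega
    have hjq : j < ((qsN.map (fun i : Nat => (i : Int))).length : Int) := by rw [hlq]; omega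
    have hjm : j < (num.length : Int) := by
      have := hz; omega
    rw [PySem.List.pyGetD_eq_getElem _ _ hj0 hjq,
      PySem.List.pyGetD_eq_getElem _ _ hj0 hjm,
      PySem.List.pyGetD_eq_getElem _ _ hj0 (by omega)]
    simp [List.getElem_zip]
  rw [h2, PySem.List.foldl_pyRange_zero_pyGetD' ((qsN.map (fun i : Nat => (i : Int))).zip num) (0, ' ')
    (fun c (p : Int × Char) => PySem.List.pySetD c p.1 p.2) cs]
  rw [List.zip_map_left, List.foldl_map]
  apply PySem.List.foldl_congr_mem
  intro acc p _
  simp [Prod.map]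

theorem bfold_eq (n : Nat) : ∀ (qsN : List Nat), (∀ i ∈ qsN, i < n) →
    ∀ (res : List (List Char)), (∀ t ∈ res, t.length = n) →
    (qsN.map (fun i : Nat => (i : Int))).foldl
      (fun results idx => results.flatMap (fun s => pvDigits.map (fun d =>
        PySem.List.slice s none (some idx) ++ [d] ++ PySem.List.slice s (some (idx + 1)) none)))
      res
    = qsN.foldl (fun results idx => results.flatMap (fun s => pvDigits.map (fun d => s.set idx d))) res := by
  intro qsN
  induction qsN with
  | nil => intro _ res _; rfl
  | cons i l ih =>
    intro hb res hres
    simp only [List.map_cons, List.foldl_cons]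
    have hstep : res.flatMap (fun s => pvDigits.map (fun d =>
        PySem.List.slice s none (some ((i : Nat) : Int)) ++ [d] ++
          PySem.List.slice s (some (((i : Nat) : Int) + 1)) none))
        = res.flatMap (fun s => pvDigits.map (fun d => s.set i d)) := by
      apply flatMap_congr_mem
      intro s hs
      have hi : i < s.length := by rw [hres s hs]; exact hb i (by simp)
      congr 1
      funext d
      rw [PySem.List.slice_to_natCast,
        show (((i : Nat) : Int) + 1) = (((i + 1 : Nat)) : Int) by push_cast; ring,
        PySem.List.slice_from_natCast,
        List.set_eq_take_append_cons_drop, if_pos hi]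
      simp
    rw [hstep]
    exact ih (fun j hj => hb j (by simp [hj])) _ (by
      intro t ht
      simp only [List.mem_flatMap, List.mem_map] at ht
      obtain ⟨s, hs, d, _, rfl⟩ := ht
      simp [hres s hs])

theorem expand_eq (s : List Char) (qsN : List Nat) :
    qsN.foldl (fun results idx => results.flatMap (fun t => pvDigits.map (fun d => t.set idx d))) [s]
    = (allDS qsN.length).map (fun num => (qsN.zip num).foldl (fun c p => c.set p.1 p.2) s) := by
  induction qsN using List.reverseRecOn with
  | nil => simp [allDS]
  | append_singleton l i ih =>
    rw [List.foldl_concat, ih,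
      show (l ++ [i]).length = l.length + 1 by simp]
    simp only [allDS]
    rw [List.flatMap_map, List.map_flatMap]
    apply flatMap_congr_mem
    intro u hu
    have hlen : l.length = u.length := (mem_allDS_length _ u hu).symm
    rw [List.map_map]
    congr 1
    funext d
    show (((l.zip u).foldl (fun c p => c.set p.1 p.2) s).set i d) = _
    simp only [Function.comp_apply]
    rw [List.zip_append hlen]
    simp

-- ===== VERDICT (by name: the statement is the Claim_ definition above) =====
theorem qsI_fact (plate_end : String) :
    ∀ x ∈ ((PySem.List.enumerate plate_end.toList 0).filter (fun p => p.2 == '?')).map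
      (fun p => p.1), 0 ≤ x ∧ x < (plate_end.toList.length : Int) := by
  intro x hx
  simp only [List.mem_map, List.mem_filter] at hx
  obtain ⟨p, ⟨hpe, _⟩, rfl⟩ := hx
  rw [PySem.List.mem_enumerate_iff] at hpe
  obtain ⟨k, hk, rfl⟩ := hpe
  constructor <;> omega

theorem generate_number_combos_spec : Claim_equal_generate_number_combos := by
  intro plate_end _
  unfold Spec_generate_number_combos
  simp only [generate_number_combos, generate_number_combos_alt]
  have hmem := qsI_fact plate_end
  set qsI := ((PySem.List.enumerate plate_end.toList 0).filter (fun p => p.2 == '?')).map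
    (fun p => p.1) with hqI
  set qsN := qsI.map Int.toNat with hqN
  have hcast : qsI = qsN.map (fun i : Nat => (i : Int)) := by
    rw [hqN, List.map_map]
    conv_lhs => rw [← List.map_id qsI]
    apply List.map_congr_left
    intro x hx
    exact (Int.toNat_of_nonneg (hmem x hx).1).symm
  have hbN : ∀ i ∈ qsN, i < plate_end.toList.length := by
    intro i hi
    rw [hqN] at hi
    simp only [List.mem_map] at hi
    obtain ⟨x, hx, rfl⟩ := hi
    have := hmem x hx
    omega
  rw [hcast]
  -- A side: counter list → canonical padded digit strings, inner loop → zip-fold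
  have hlen : PySem.List.len (qsN.map (fun i : Nat => (i : Int))) = ((qsN.length : Nat) : Int) := by
    rw [PySem.List.len_eq]; simp
  simp only [hlen, Int.toNat_natCast]
  have hpow : (10 : Int) ^ qsN.length = (((10 ^ qsN.length : Nat)) : Int) := by push_cast; ring
  rw [hpow, PySem.List.pyRange_zero_natCast (10 ^ qsN.length)]
  rw [foldl_append_singleton]
  simp only [List.nil_append, List.map_map, Function.comp_def]
  have hA : ∀ m ∈ List.range (10 ^ qsN.length),
      String.ofList ((PySem.List.pyRange 0 ((qsN.length : Nat) : Int) 1).foldl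
        (fun cur j => PySem.List.pySetD cur
          (PySem.List.pyGetD (qsN.map (fun i : Nat => (i : Int))) j 0)
          (PySem.List.pyGetD (PySem.List.pyRepeat ['0']
            (((qsN.length : Nat) : Int) - (((PySem.Int.toChars ((m : Nat) : Int)).length : Nat) : Int))
            ++ PySem.Int.toChars ((m : Nat) : Int)) j ' ')) plate_end.toList)
      = String.ofList ((qsN.zip (padC qsN.length m)).foldl (fun c p => c.set p.1 p.2)
          plate_end.toList) := by
    intro m _
    have hnum : PySem.List.pyRepeat ['0']
        (((qsN.length : Nat) : Int) - (((PySem.Int.toChars ((m : Nat) : Int)).length : Nat) : Int))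
        ++ PySem.Int.toChars ((m : Nat) : Int) = padC qsN.length m := by
      rw [toChars_natCast, PySem.List.pyRepeat_singleton, padC,
        show (((qsN.length : Nat) : Int) - (((myDigits m).length : Nat) : Int)).toNat
          = qsN.length - (myDigits m).length by omega]
    rw [hnum, ← hlen, innerfold_eq plate_end.toList qsN (padC qsN.length m) (padC_len _ _)]
  rw [List.map_congr_left hA]
  -- B side: slice-splice loop → set loop → canonical map over all digit strings
  rw [show (['0','1','2','3','4','5','6','7','8','9'] : List Char) = pvDigits from rfl,
    bfold_eq plate_end.toList.length qsN hbN [plate_end.toList] (by simp),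
    expand_eq, List.map_map]
  -- connect the two sides
  rcases Nat.eq_zero_or_pos qsN.length with h0 | h0
  · rw [List.length_eq_zero_iff] at h0
    rw [h0]
    simp [allDS]
  · rw [← nums_eq qsN.length h0, List.map_map]
    apply List.map_congr_left
    intro m _
    simp
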